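-- pv_equiv track=rewrite | github.com/pmadhurn/IMU560-SP2520-CONTROLLER | enhanced_north_pointing_controller.py | _calculate_actual_movement
-- ===== SOURCE A (Python) =====
-- def _calculate_actual_movement(start_heading, end_heading, direction):
--     """Calculate actual movement that occurred"""
--     if start_heading is None or end_heading is None:
--         return 0
--
--     movement = end_heading - start_heading
--
--     # Normalize to [0, 360]
--     while movement < 0:
--         movement += 360
--     while movement >= 360:
--         movement -= 360
--
--     # Convert to signed movement based on direction
--     if direction == 'left':
--         if movement > 180:
--             movement = movement - 360
--     else:  # right
--         if movement > 180:
--             movement = 360 - movement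
--         else:
--             movement = -movement
--
--     return abs(movement)
-- ===== SOURCE B (Python) =====
-- def _calculate_actual_movement(start_heading, end_heading, direction):
--     """Calculate actual movement that occurred (shortest angular distance)."""
--     if start_heading is None or end_heading is None:
--         return 0
--     d = (end_heading - start_heading) % 360
--     return min(d, 360 - d)
-- ===== Notes on version B (the rewrite author's own statement) =====
-- stated objective: simpler
-- what changed: Replaced the two normalization while-loops and the direction branching by a single modulo and min(d, 360-d); the direction argument provably never affects the result.
import Mathlib
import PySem

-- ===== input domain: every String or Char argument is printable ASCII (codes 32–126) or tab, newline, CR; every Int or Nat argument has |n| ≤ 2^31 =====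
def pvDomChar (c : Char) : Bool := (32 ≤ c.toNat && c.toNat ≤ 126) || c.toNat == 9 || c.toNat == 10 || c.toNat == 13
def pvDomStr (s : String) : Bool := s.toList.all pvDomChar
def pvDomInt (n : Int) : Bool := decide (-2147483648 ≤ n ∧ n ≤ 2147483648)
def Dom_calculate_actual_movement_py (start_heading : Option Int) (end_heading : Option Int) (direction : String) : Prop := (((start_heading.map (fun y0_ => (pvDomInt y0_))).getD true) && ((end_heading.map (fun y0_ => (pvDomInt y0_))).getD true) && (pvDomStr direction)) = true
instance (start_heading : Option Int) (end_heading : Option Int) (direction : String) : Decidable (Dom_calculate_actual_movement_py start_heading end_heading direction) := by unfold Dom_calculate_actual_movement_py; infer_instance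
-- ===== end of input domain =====

-- B replaces A's while-loop normalization and direction branching by (e-s) % 360 and min(d, 360-d); objective: simpler.


-- ===== PORT A =====
-- while movement < 0: movement += 360
def pvNormNeg (m : Int) : Int :=
  if m < 0 then pvNormNeg (m + 360) else m
termination_by (-m).toNat
decreasing_by omega

-- while movement >= 360: movement -= 360
def pvNormHi (m : Int) : Int :=
  if m ≥ 360 then pvNormHi (m - 360) else m
termination_by m.toNat
decreasing_by omega

def calculate_actual_movement_py (start_heading : Option Int) (end_heading : Option Int) (direction : String) : Int :=
  match start_heading, end_heading with
  | none, _ => 0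
  | _, none => 0
  | some s, some e =>
    let movement := e - s
    let movement := pvNormHi (pvNormNeg movement)
    let movement :=
      if direction == "left" then
        if movement > 180 then movement - 360 else movement
      else
        if movement > 180 then 360 - movement else -movement
    movement.natAbs

-- ===== PORT B =====
def calculate_actual_movement_py_alt (start_heading : Option Int) (end_heading : Option Int) (direction : String) : Int :=
  match start_heading, end_heading with
  | none, _ => 0
  | _, none => 0
  | some s, some e =>
    let d := PySem.Int.mod (e - s) 360
    min d (360 - d)

-- ===== PRECONDITION & SPEC =====
def Spec_calculate_actual_movement_py (start_heading : Option Int) (end_heading : Option Int) (direction : String) (out : Int) : Prop := out = calculate_actual_movement_py_alt start_heading end_heading direction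
instance (start_heading : Option Int) (end_heading : Option Int) (direction : String) (out : Int) : Decidable (Spec_calculate_actual_movement_py start_heading end_heading direction out) := by unfold Spec_calculate_actual_movement_py; infer_instance

-- ===== CLAIM (what is proved, stated in full; the proofs are below) =====
def Claim_equal_calculate_actual_movement_py : Prop := ∀ (start_heading : Option Int) (end_heading : Option Int) (direction : String), Dom_calculate_actual_movement_py start_heading end_heading direction → Spec_calculate_actual_movement_py start_heading end_heading direction (calculate_actual_movement_py start_heading end_heading direction)

-- ===== LEMMAS AND PROOFS =====
theorem pvNormNeg_spec : ∀ (m : Int), 0 ≤ pvNormNeg m ∧ pvNormNeg m % 360 = m % 360 := by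
  intro m
  induction m using pvNormNeg.induct with
  | case1 m h ih =>
    rw [pvNormNeg, if_pos h]
    exact ⟨ih.1, by omega⟩
  | case2 m h =>
    rw [pvNormNeg, if_neg h]
    exact ⟨by omega, rfl⟩

theorem pvNormHi_spec : ∀ (m : Int), 0 ≤ m → pvNormHi m = m % 360 := by
  intro m
  induction m using pvNormHi.induct with
  | case1 m h ih =>
    intro h0
    rw [pvNormHi, if_pos h, ih (by omega)]
    omega
  | case2 m h =>
    intro h0
    rw [pvNormHi, if_neg h]
    omega

-- ===== VERDICT (by name: the statement is the Claim_ definition above) =====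
theorem calculate_actual_movement_py_spec : Claim_equal_calculate_actual_movement_py := by
  intro s e dir _
  unfold Spec_calculate_actual_movement_py
  match s, e with
  | none, _ => rfl
  | some s, none => rfl
  | some s, some e =>
    simp only [calculate_actual_movement_py, calculate_actual_movement_py_alt]
    have h1 := pvNormNeg_spec (e - s)
    have h2 := pvNormHi_spec (pvNormNeg (e - s)) h1.1
    have hm : pvNormHi (pvNormNeg (e - s)) = (e - s) % 360 := by rw [h2]; omega
    have hmod : PySem.Int.mod (e - s) 360 = (e - s) % 360 := by
      simp [PySem.Int.mod, Int.fmod_eq_emod]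
    rw [hm, hmod]
    have hb : 0 ≤ (e - s) % 360 ∧ (e - s) % 360 < 360 := ⟨Int.emod_nonneg _ (by norm_num), Int.emod_lt_of_pos _ (by norm_num)⟩
    by_cases hd : dir == "left" <;> simp only [hd, if_true] <;> split_ifs <;> omega
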